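-- pv_equiv track=rewrite | github.com/need-singularity/sylvian-singularity | math/game_theory_n6.py | wythoff_grundy
-- ===== SOURCE A (Python) =====
-- def wythoff_grundy(max_pos=20):
--     """Compute Grundy values for Wythoff's game."""
--     G = {}
--     for total in range(max_pos * 2 + 1):
--         for a in range(min(total + 1, max_pos + 1)):
--             b = total - a
--             if b > max_pos:
--                 continue
--             if a > b:
--                 continue
--             # Moves:
--             # 1. Remove k from pile a (k >= 1): (a-k, b) -> (min, max)
--             # 2. Remove k from pile b (k >= 1): (a, b-k) -> (min, max)
--             # 3. Remove k from both: (a-k, b-k) -> (min, max)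
--             mex_set = set()
--
--             # Remove from first pile
--             for k in range(1, a + 1):
--                 pos = (min(a-k, b), max(a-k, b))
--                 if pos in G:
--                     mex_set.add(G[pos])
--
--             # Remove from second pile
--             for k in range(1, b + 1):
--                 pos = (min(a, b-k), max(a, b-k))
--                 if pos in G:
--                     mex_set.add(G[pos])
--
--             # Remove from both
--             for k in range(1, min(a, b) + 1):
--                 pos = (min(a-k, b-k), max(a-k, b-k))
--                 if pos in G:
--                     mex_set.add(G[pos])
--
--             # MEX
--             mex = 0
--             while mex in mex_set:
--                 mex += 1
--             G[(a, b)] = mex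
--
--     return G
-- ===== SOURCE B (Python) =====
-- def wythoff_grundy(max_pos=20):
--     """Compute Grundy values for Wythoff's game (top-down memoized recursion)."""
--     memo = {}
--
--     def grundy(a, b):
--         # Grundy value of the normalised position (a, b), 0 <= a <= b.
--         if (a, b) in memo:
--             return memo[(a, b)]
--         succ = {grundy(a - k, b) for k in range(1, a + 1)}
--         succ.update(grundy(min(a, b - k), max(a, b - k)) for k in range(1, b + 1))
--         succ.update(grundy(a - k, b - k) for k in range(1, a + 1))
--         g = next(i for i in range(len(succ) + 1) if i not in succ)
--         memo[(a, b)] = g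
--         return g
--
--     return {(a, s - a): grundy(a, s - a)
--             for s in range(2 * max_pos + 1)
--             for a in range(max(0, s - max_pos), s // 2 + 1)}
-- ===== Notes on version B (the rewrite author's own statement) =====
-- stated objective: alternative
-- what changed: B replaces A's bottom-up guarded diagonal DP (full a-range with two continue guards, 'pos in G' membership tests before every table read, and an incrementing while-loop mex) by top-down memoized recursion: a recursive grundy(a,b) that computes a position's value on demand from recursive calls on its successor positions, caching in a memo dict, with the mex found as the first missing element of range(len(succ)+1).
import Mathlib
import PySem

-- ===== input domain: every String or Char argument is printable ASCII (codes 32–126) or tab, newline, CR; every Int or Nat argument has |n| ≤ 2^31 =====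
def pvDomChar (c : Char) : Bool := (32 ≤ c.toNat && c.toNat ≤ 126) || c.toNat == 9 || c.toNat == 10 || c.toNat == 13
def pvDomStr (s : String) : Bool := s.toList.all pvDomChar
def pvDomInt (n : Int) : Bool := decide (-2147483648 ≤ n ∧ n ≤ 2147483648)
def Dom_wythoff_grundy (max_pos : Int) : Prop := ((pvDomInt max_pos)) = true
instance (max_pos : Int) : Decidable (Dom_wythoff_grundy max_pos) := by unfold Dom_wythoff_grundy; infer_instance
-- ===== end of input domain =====

-- B replaces A's bottom-up guarded diagonal DP by top-down memoized recursion (a recursive grundy(a,b)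
-- caching in a memo dict, mex as the first missing element of range(len(succ)+1)).

-- ===== PORT A =====
-- the 'while mex in mex_set: mex += 1' loop; fuel mex_set.length + 1 always suffices (proved below)
def pvMexLoop (s : PySem.Set Int) (m : Int) : Nat → Int
  | 0 => m
  | fuel+1 => if s.contains m then pvMexLoop s (m+1) fuel else m

-- the body of A's double loop for one admitted cell (a, b); G[pos] under the 'pos in G' guard is getD (exact there)
def pvStepA (G : PySem.Dict (Int × Int) Int) (a b : Int) : PySem.Dict (Int × Int) Int :=
  let s1 := (PySem.List.pyRange 1 (a + 1) 1).foldl (fun st k =>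
      let pos := (min (a - k) b, max (a - k) b)
      if G.contains pos then st.add (G.getD pos 0) else st) PySem.Set.empty
  let s2 := (PySem.List.pyRange 1 (b + 1) 1).foldl (fun st k =>
      let pos := (min a (b - k), max a (b - k))
      if G.contains pos then st.add (G.getD pos 0) else st) s1
  let s3 := (PySem.List.pyRange 1 (min a b + 1) 1).foldl (fun st k =>
      let pos := (min (a - k) (b - k), max (a - k) (b - k))
      if G.contains pos then st.add (G.getD pos 0) else st) s2
  G.insert (a, b) (pvMexLoop s3 0 (s3.length + 1))

def wythoff_grundy (max_pos : Int) : List (Int × Int × Int) :=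
  ((PySem.List.pyRange 0 (max_pos * 2 + 1) 1).foldl (fun G total =>
      (PySem.List.pyRange 0 (min (total + 1) (max_pos + 1)) 1).foldl (fun G a =>
        let b := total - a
        if b > max_pos then G
        else if a > b then G
        else pvStepA G a b) G)
    PySem.Dict.empty).items.map (fun p => (p.1.1, p.1.2, p.2))

-- ===== PORT B =====
-- B's recursive helper grundy(a, b) with its closed-over memo dict, threaded explicitly.
-- Python's recursion terminates because every recursive call strictly lowers a+b; the port makes the
-- same computation total with a fuel counter (fuel s+1 at the top-level call; the fuel-0 branch is
-- never reached on the calls the program makes, proved below) — no algorithm change.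
def pvGrundy : Nat → PySem.Dict (Int × Int) Int → Int → Int →
    PySem.Dict (Int × Int) Int × Int
  | fuel, memo, a, b =>
    match memo.get? (a, b) with
    | some g => (memo, g)
    | none =>
      match fuel with
      | 0 => (memo, 0)  -- unreachable
      | f + 1 =>
        -- succ = {grundy(a - k, b) for k in range(1, a + 1)}
        let st1 := (PySem.List.pyRange 1 (a + 1) 1).foldl (fun st k =>
            let r := pvGrundy f st.1 (a - k) b
            (r.1, st.2.add r.2)) (memo, PySem.Set.empty)
        -- succ.update(grundy(min(a, b - k), max(a, b - k)) for k in range(1, b + 1))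
        let st2 := (PySem.List.pyRange 1 (b + 1) 1).foldl (fun st k =>
            let r := pvGrundy f st.1 (min a (b - k)) (max a (b - k))
            (r.1, st.2.add r.2)) st1
        -- succ.update(grundy(a - k, b - k) for k in range(1, a + 1))
        let st3 := (PySem.List.pyRange 1 (a + 1) 1).foldl (fun st k =>
            let r := pvGrundy f st.1 (a - k) (b - k)
            (r.1, st.2.add r.2)) st2
        -- g = next(i for i in range(len(succ) + 1) if i not in succ); the generator never exhausts (proved below)
        let g := ((PySem.List.pyRange 0 ((st3.2.length : Int) + 1) 1).find?
            (fun i => !(st3.2.contains i))).getD 0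
        (st3.1.insert (a, b) g, g)

def wythoff_grundy_alt (max_pos : Int) : List (Int × Int × Int) :=
  (((PySem.List.pyRange 0 (2 * max_pos + 1) 1).foldl (fun st s =>
      (PySem.List.pyRange (max 0 (s - max_pos)) (PySem.Int.floordiv s 2 + 1) 1).foldl (fun st a =>
        let r := pvGrundy (s.toNat + 1) st.1 a (s - a)
        (r.1, st.2.insert (a, s - a) r.2)) st)
    (PySem.Dict.empty, PySem.Dict.empty)).2).items.map (fun p => (p.1.1, p.1.2, p.2))

-- ===== PRECONDITION & SPEC =====
def Spec_wythoff_grundy (max_pos : Int) (out : List (Int × Int × Int)) : Prop := out = wythoff_grundy_alt max_pos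
instance (max_pos : Int) (out : List (Int × Int × Int)) : Decidable (Spec_wythoff_grundy max_pos out) := by unfold Spec_wythoff_grundy; infer_instance

-- ===== CLAIM (what is proved, stated in full; the proofs are below) =====
def Claim_equal_wythoff_grundy : Prop := ∀ (max_pos : Int), Dom_wythoff_grundy max_pos → Spec_wythoff_grundy max_pos (wythoff_grundy max_pos)

-- ===== LEMMAS AND PROOFS =====

-- "r is the least nonnegative integer not in S" (membership-only, so set order is irrelevant)
def pvIsMex (S : List Int) (r : Int) : Prop := 0 ≤ r ∧ r ∉ S ∧ ∀ j : Int, 0 ≤ j → j < r → j ∈ S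

lemma pvIsMex_unique (S : List Int) (r r' : Int) (h : pvIsMex S r) (h' : pvIsMex S r') : r = r' := by
  obtain ⟨h0, hnm, hlt⟩ := h
  obtain ⟨h0', hnm', hlt'⟩ := h'
  rcases lt_trichotomy r r' with hc | hc | hc
  · exact absurd (hlt' r h0 hc) hnm
  · exact hc
  · exact absurd (hlt r' h0' hc) hnm'

lemma pv_exists_not_mem (S : List Int) :
    ∃ r : Int, 0 ≤ r ∧ r ≤ (S.length : Int) ∧ r ∉ S := by
  by_contra hc
  push Not at hc
  have hsub : PySem.List.pyRange 0 ((S.length : Int) + 1) 1 ⊆ S := by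
    intro x hx
    have := PySem.List.mem_pyRange_one.mp hx
    exact hc x this.1 (by omega)
  have hlen := (List.subperm_of_subset (PySem.List.nodup_pyRange_one _ _) hsub).length_le
  rw [PySem.List.length_pyRange_one] at hlen
  omega

lemma pvMexLoop_go (S : PySem.Set Int) :
    ∀ (fuel : Nat) (m r : Int), 0 ≤ m → (∀ j : Int, 0 ≤ j → j < m → j ∈ S) →
      m ≤ r → r < m + (fuel : Int) → r ∉ S → pvIsMex S (pvMexLoop S m fuel) := by
  intro fuel
  induction fuel with
  | zero => intro m r _ _ hmr hr _; simp at hr; omega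
  | succ f ih =>
    intro m r hm hbelow hmr hr hrnm
    rw [pvMexLoop]
    by_cases hmem : m ∈ S
    · rw [if_pos ((PySem.Set.contains_iff _ _).mpr hmem)]
      have hne : r ≠ m := fun h => hrnm (h ▸ hmem)
      refine ih (m + 1) r (by omega) ?_ (by omega) (by push_cast at hr ⊢; omega) hrnm
      intro j hj hjm
      rcases lt_or_ge j m with hc | hc
      · exact hbelow j hj hc
      · have : j = m := by omega
        exact this ▸ hmem
    · rw [if_neg (by simpa [PySem.Set.contains_iff] using hmem)]
      exact ⟨hm, hmem, hbelow⟩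

lemma pvMexLoop_spec (S : PySem.Set Int) :
    pvIsMex S (pvMexLoop S 0 (S.length + 1)) := by
  obtain ⟨r, hr0, hrl, hrn⟩ := pv_exists_not_mem S
  exact pvMexLoop_go S (S.length + 1) 0 r le_rfl (by omega) hr0 (by push_cast; omega) hrn

-- B's mex: the first element of range(len(S)+1) missing from S
lemma pvFindMex_go (S : PySem.Set Int) :
    ∀ (len : Nat) (j : Int), 0 ≤ j → (∀ i : Int, 0 ≤ i → i < j → i ∈ S) →
      (∃ r : Int, j ≤ r ∧ r < j + (len : Int) ∧ r ∉ S) →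
      ∃ v, (PySem.List.pyRange j (j + (len : Int)) 1).find? (fun i => !(S.contains i)) = some v ∧
        pvIsMex S v := by
  intro len
  induction len with
  | zero => intro j _ _ ⟨r, h1, h2, _⟩; simp at h2; omega
  | succ f ih =>
    intro j hj hbelow ⟨r, hjr, hrlt, hrnm⟩
    rw [PySem.List.pyRange_one_cons (by push_cast; omega)]
    by_cases hmem : j ∈ S
    · have hcj : S.contains j = true := (PySem.Set.contains_iff _ _).mpr hmem
      simp only [List.find?_cons, hcj, Bool.not_true]
      have hne : r ≠ j := fun h => hrnm (h ▸ hmem)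
      have hstep : j + ((f + 1 : Nat) : Int) = (j + 1) + (f : Nat) := by push_cast; omega
      rw [hstep]
      refine ih (j + 1) (by omega) ?_ ⟨r, by omega, by push_cast at hrlt ⊢; omega, hrnm⟩
      intro i hi hij
      rcases lt_or_ge i j with hc | hc
      · exact hbelow i hi hc
      · have : i = j := by omega
        exact this ▸ hmem
    · have hcj : S.contains j = false := by
        cases h : S.contains j
        · rfl
        · exact absurd ((PySem.Set.contains_iff _ _).mp h) hmem
      simp only [List.find?_cons, hcj, Bool.not_false]
      exact ⟨j, rfl, hj, hmem, hbelow⟩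

lemma pvFindMex_spec (S : PySem.Set Int) :
    pvIsMex S (((PySem.List.pyRange 0 ((S.length : Int) + 1) 1).find?
      (fun i => !(S.contains i))).getD 0) := by
  obtain ⟨r, hr0, hrl, hrn⟩ := pv_exists_not_mem S
  obtain ⟨v, hv, hvm⟩ := pvFindMex_go S (S.length + 1) 0 le_rfl (by omega)
    ⟨r, hr0, by push_cast; omega, hrn⟩
  have hcast : ((S.length + 1 : Nat) : Int) = (S.length : Int) + 1 := by push_cast; ring
  rw [hcast] at hv
  rw [show (0 : Int) + ((S.length : Int) + 1) = (S.length : Int) + 1 by omega] at hv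
  rw [hv, Option.getD_some]
  exact hvm

-- the cell sequence both programs fill, in order: diagonals s = a + b ascending, a ascending inside a diagonal
def pvCells (m : Int) : List (Int × Int) :=
  (PySem.List.pyRange 0 (m * 2 + 1) 1).flatMap (fun s =>
    (PySem.List.pyRange (max 0 (s - m)) (PySem.Int.floordiv s 2 + 1) 1).map (fun a => (a, s - a)))

def pvCellLt (p q : Int × Int) : Prop := p.1 + p.2 < q.1 + q.2 ∨ (p.1 + p.2 = q.1 + q.2 ∧ p.1 < q.1)

lemma pv_mem_cells (m : Int) (p : Int × Int) :
    p ∈ pvCells m ↔ 0 ≤ p.1 ∧ p.1 ≤ p.2 ∧ p.2 ≤ m := by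
  obtain ⟨a, b⟩ := p
  simp only [pvCells, List.mem_flatMap, List.mem_map, PySem.List.mem_pyRange_one]
  constructor
  · rintro ⟨s, ⟨hs0, hs1⟩, x, ⟨hx0, hx1⟩, hx⟩
    have h1 : x = a := congrArg Prod.fst hx
    have h2 : s - x = b := congrArg Prod.snd hx
    have h3 : x ≤ PySem.Int.floordiv s 2 := by omega
    have h4 := (PySem.Int.le_floordiv_iff_mul_le (by norm_num)).mp h3
    refine ⟨by omega, by omega, by omega⟩
  · rintro ⟨h0, hab, hbm⟩
    refine ⟨a + b, ⟨by omega, by omega⟩, a, ⟨by omega, ?_⟩, by simp⟩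
    have : a ≤ PySem.Int.floordiv (a + b) 2 := by
      rw [PySem.Int.le_floordiv_iff_mul_le (by norm_num)]
      omega
    omega

lemma pv_pairwise_cells (m : Int) : (pvCells m).Pairwise pvCellLt := by
  unfold pvCells
  apply List.pairwise_flatMap.mpr
  constructor
  · intro s _
    apply List.pairwise_map.mpr
    refine (PySem.List.pairwise_lt_pyRange_one _ _).imp ?_
    intro x y hxy
    right
    exact ⟨by omega, hxy⟩
  · refine (PySem.List.pairwise_lt_pyRange_one _ _).imp ?_
    intro s1 s2 hs x hx y hy
    obtain ⟨ax, _, hax⟩ := List.mem_map.mp hx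
    obtain ⟨ay, _, hay⟩ := List.mem_map.mp hy
    left
    rw [← hax, ← hay]
    simpa using hs

lemma pv_nodup_cells (m : Int) : (pvCells m).Nodup := by
  refine (pv_pairwise_cells m).imp ?_
  intro p q hpq
  rcases hpq with h | ⟨h1, h2⟩
  · intro he; rw [he] at h; omega
  · intro he; rw [he] at h2; omega

-- conversion of A's guarded inner loop into the tight range the cell list uses
lemma pv_filter_range (s m : Int) (hs0 : 0 ≤ s) (hsm : s ≤ m * 2) :
    (PySem.List.pyRange 0 (min (s + 1) (m + 1)) 1).filter
        (fun a => decide (s - m ≤ a ∧ 2 * a ≤ s))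
      = PySem.List.pyRange (max 0 (s - m)) (PySem.Int.floordiv s 2 + 1) 1 := by
  have hperm : ((PySem.List.pyRange 0 (min (s + 1) (m + 1)) 1).filter
      (fun a => decide (s - m ≤ a ∧ 2 * a ≤ s))).Perm
      (PySem.List.pyRange (max 0 (s - m)) (PySem.Int.floordiv s 2 + 1) 1) := by
    apply (List.perm_ext_iff_of_nodup ((PySem.List.nodup_pyRange_one _ _).filter _)
      (PySem.List.nodup_pyRange_one _ _)).mpr
    intro x
    rw [List.mem_filter]
    simp only [PySem.List.mem_pyRange_one, decide_eq_true_eq]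
    have h1 : x ≤ PySem.Int.floordiv s 2 ↔ x * 2 ≤ s := PySem.Int.le_floordiv_iff_mul_le (by norm_num)
    have h2 : PySem.Int.floordiv s 2 < s + 1 ↔ s < (s + 1) * 2 := PySem.Int.floordiv_lt_iff_lt_mul (by norm_num)
    omega
  exact hperm.eq_of_pairwise (fun a b _ _ h1 h2 => le_antisymm h1 h2)
    (((PySem.List.pairwise_lt_pyRange_one _ _).filter _).imp le_of_lt)
    ((PySem.List.pairwise_lt_pyRange_one _ _).imp le_of_lt)

lemma pvA_inner (m s : Int) (hs0 : 0 ≤ s) (hs2 : s ≤ m * 2) (G0 : PySem.Dict (Int × Int) Int) :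
    (PySem.List.pyRange 0 (min (s + 1) (m + 1)) 1).foldl (fun G a =>
        let b := s - a
        if b > m then G else if a > b then G else pvStepA G a b) G0
      = (PySem.List.pyRange (max 0 (s - m)) (PySem.Int.floordiv s 2 + 1) 1).foldl
        (fun G a => pvStepA G a (s - a)) G0 := by
  rw [PySem.List.foldl_congr_mem
    (g := fun G a => if s - m ≤ a ∧ 2 * a ≤ s then pvStepA G a (s - a) else G)]
  · rw [PySem.List.foldl_ite_eq_foldl_filter, pv_filter_range s m hs0 hs2]
  · intro G a hmem
    simp only []
    split_ifs with hg1 hg2 hg3 <;> try rfl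
    · omega
    · omega
    · omega

lemma pvA_eq_cells (m : Int) :
    wythoff_grundy m = ((pvCells m).foldl (fun G p => pvStepA G p.1 p.2)
      PySem.Dict.empty).items.map (fun p => (p.1.1, p.1.2, p.2)) := by
  unfold wythoff_grundy pvCells
  rw [List.foldl_flatMap]
  congr 1
  apply congrArg (fun d => PySem.Dict.items d)
  apply PySem.List.foldl_congr_mem
  intro G s hs
  have hb := PySem.List.mem_pyRange_one.mp hs
  rw [List.foldl_map]
  exact pvA_inner m s hb.1 (by omega) G

-- B's double fold as a fold over the same cell list
lemma pvB_eq_cells (m : Int) :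
    wythoff_grundy_alt m = (((pvCells m).foldl (fun st p =>
        let r := pvGrundy ((p.1 + p.2).toNat + 1) st.1 p.1 p.2
        (r.1, st.2.insert (p.1, p.2) r.2)) (PySem.Dict.empty, PySem.Dict.empty)).2).items.map
      (fun p => (p.1.1, p.1.2, p.2)) := by
  unfold wythoff_grundy_alt pvCells
  rw [show 2 * m + 1 = m * 2 + 1 by ring, List.foldl_flatMap]
  congr 2
  apply congrArg Prod.snd
  apply PySem.List.foldl_congr_mem
  intro st s _
  rw [List.foldl_map]
  apply PySem.List.foldl_congr_mem
  intro st' a _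
  simp only []
  rw [show a + (s - a) = s by ring]

-- a memoised call returns the cached value and leaves the memo unchanged, whatever the fuel
lemma pvGrundy_of_mem (fuel : Nat) (memo : PySem.Dict (Int × Int) Int) (a b : Int) (g : Int)
    (h : memo.get? (a, b) = some g) : pvGrundy fuel memo a b = (memo, g) := by
  cases fuel <;> rw [pvGrundy] <;> rw [h]

-- a fold of recursive calls whose arguments are all memoised only collects lookups
lemma pv_fold_lookup (f : Nat) (x y : Int → Int) (l : List Int) :
    ∀ (memo : PySem.Dict (Int × Int) Int) (s0 : PySem.Set Int),
    (∀ k ∈ l, memo.contains (x k, y k) = true) →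
    l.foldl (fun st k =>
        let r := pvGrundy f st.1 (x k) (y k)
        (r.1, st.2.add r.2)) (memo, s0)
      = (memo, l.foldl (fun s k => s.add (memo.getD (x k, y k) 0)) s0) := by
  induction l with
  | nil => intro memo s0 _; rfl
  | cons k t ih =>
    intro memo s0 h
    have hc := h k (List.mem_cons_self)
    obtain ⟨g, hg⟩ : ∃ g, memo.get? (x k, y k) = some g := by
      cases hq : memo.get? (x k, y k) with
      | none =>
        rw [PySem.Dict.contains_eq_isSome_get?, hq] at hc
        simp at hc
      | some g => exact ⟨g, rfl⟩
    simp only [List.foldl_cons]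
    rw [pvGrundy_of_mem f memo (x k) (y k) g hg]
    have hgd : memo.getD (x k, y k) 0 = g := PySem.Dict.getD_of_get?_eq_some memo 0 hg
    rw [← hgd]
    exact ih memo _ (fun k' hk' => h k' (List.mem_cons_of_mem _ hk'))

-- pvStepA always just appends/overwrites the key (a, b) with the value it computed
lemma pvStepA_insert (G : PySem.Dict (Int × Int) Int) (a b : Int) :
    pvStepA G a b = G.insert (a, b) ((pvStepA G a b).getD (a, b) 0) := by
  conv_lhs => rw [pvStepA]
  rw [pvStepA, PySem.Dict.getD_insert_self]

-- the heart: on a fresh admitted cell whose strict predecessors are all memoised, one unfolding of B's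
-- recursion computes exactly what A's bottom-up step inserts (recursion depth 1: every inner call hits the memo)
lemma pvGrundy_eq_step (G : PySem.Dict (Int × Int) Int) (m a b : Int)
    (ha : 0 ≤ a) (hab : a ≤ b) (hbm : b ≤ m)
    (H : ∀ q : Int × Int, 0 ≤ q.1 → q.1 ≤ q.2 → q.2 ≤ m → q.1 + q.2 < a + b →
      G.contains q = true)
    (hfresh : G.get? (a, b) = none) (f : Nat) :
    pvGrundy (f + 1) G a b = (pvStepA G a b, (pvStepA G a b).getD (a, b) 0) := by
  rw [pvGrundy, hfresh]
  simp only []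
  -- the three inner folds of B: every argument is memoised, so they are pure lookup folds
  rw [pv_fold_lookup f (fun k => a - k) (fun _ => b) _ G PySem.Set.empty
    (by
      intro k hk
      have hb := PySem.List.mem_pyRange_one.mp hk
      exact H (a - k, b) (by dsimp only; omega) (by dsimp only; omega)
        (by dsimp only; omega) (by dsimp only; omega))]
  rw [pv_fold_lookup f (fun k => min a (b - k)) (fun k => max a (b - k)) _ G _
    (by
      intro k hk
      have hb := PySem.List.mem_pyRange_one.mp hk
      exact H (min a (b - k), max a (b - k)) (by dsimp only; omega) (by dsimp only; omega)
        (by dsimp only; omega) (by dsimp only; omega))]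
  rw [pv_fold_lookup f (fun k => a - k) (fun k => b - k) _ G _
    (by
      intro k hk
      have hb := PySem.List.mem_pyRange_one.mp hk
      exact H (a - k, b - k) (by dsimp only; omega) (by dsimp only; omega)
        (by dsimp only; omega) (by dsimp only; omega))]
  simp only []
  -- rewrite A's guarded step into the same three lookup folds
  have hA : pvStepA G a b = G.insert (a, b)
      (pvMexLoop ((PySem.List.pyRange 1 (a + 1) 1).foldl
        (fun s k => s.add (G.getD (a - k, b - k) 0))
        ((PySem.List.pyRange 1 (b + 1) 1).foldl
          (fun s k => s.add (G.getD (min a (b - k), max a (b - k)) 0))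
          ((PySem.List.pyRange 1 (a + 1) 1).foldl
            (fun s k => s.add (G.getD (a - k, b) 0)) PySem.Set.empty))) 0
        (((PySem.List.pyRange 1 (a + 1) 1).foldl
        (fun s k => s.add (G.getD (a - k, b - k) 0))
        ((PySem.List.pyRange 1 (b + 1) 1).foldl
          (fun s k => s.add (G.getD (min a (b - k), max a (b - k)) 0))
          ((PySem.List.pyRange 1 (a + 1) 1).foldl
            (fun s k => s.add (G.getD (a - k, b) 0)) PySem.Set.empty))).length + 1)) := by
    unfold pvStepA
    simp only [min_eq_left hab]
    have h1 : ∀ (st : PySem.Set Int) (k : Int), k ∈ PySem.List.pyRange 1 (a + 1) 1 →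
        (if G.contains (min (a - k) b, max (a - k) b) then
          st.add (G.getD (min (a - k) b, max (a - k) b) 0) else st)
        = st.add (G.getD (a - k, b) 0) := by
      intro st k hk
      have hb := PySem.List.mem_pyRange_one.mp hk
      have hmin : min (a - k) b = a - k := by omega
      have hmax : max (a - k) b = b := by omega
      rw [hmin, hmax, if_pos (H (a - k, b) (by dsimp only; omega) (by dsimp only; omega)
        (by dsimp only; omega) (by dsimp only; omega))]
    have h2 : ∀ (st : PySem.Set Int) (k : Int), k ∈ PySem.List.pyRange 1 (b + 1) 1 →
        (if G.contains (min a (b - k), max a (b - k)) then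
          st.add (G.getD (min a (b - k), max a (b - k)) 0) else st)
        = st.add (G.getD (min a (b - k), max a (b - k)) 0) := by
      intro st k hk
      have hb := PySem.List.mem_pyRange_one.mp hk
      exact if_pos (H (min a (b - k), max a (b - k)) (by dsimp only; omega) (by dsimp only; omega)
        (by dsimp only; omega) (by dsimp only; omega))
    have h3 : ∀ (st : PySem.Set Int) (k : Int), k ∈ PySem.List.pyRange 1 (a + 1) 1 →
        (if G.contains (min (a - k) (b - k), max (a - k) (b - k)) then
          st.add (G.getD (min (a - k) (b - k), max (a - k) (b - k)) 0) else st)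
        = st.add (G.getD (a - k, b - k) 0) := by
      intro st k hk
      have hb := PySem.List.mem_pyRange_one.mp hk
      have hmin : min (a - k) (b - k) = a - k := by omega
      have hmax : max (a - k) (b - k) = b - k := by omega
      rw [hmin, hmax, if_pos (H (a - k, b - k) (by dsimp only; omega) (by dsimp only; omega)
        (by dsimp only; omega) (by dsimp only; omega))]
    rw [PySem.List.foldl_congr_mem _ _ _ _ h1, PySem.List.foldl_congr_mem _ _ _ _ h2,
      PySem.List.foldl_congr_mem _ _ _ _ h3]
  set S : PySem.Set Int := (PySem.List.pyRange 1 (a + 1) 1).foldl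
      (fun s k => s.add (G.getD (a - k, b - k) 0))
      ((PySem.List.pyRange 1 (b + 1) 1).foldl
        (fun s k => s.add (G.getD (min a (b - k), max a (b - k)) 0))
        ((PySem.List.pyRange 1 (a + 1) 1).foldl
          (fun s k => s.add (G.getD (a - k, b) 0)) PySem.Set.empty)) with hS
  -- both mex computations return the (unique) mex of the same set S
  have hmex : (((PySem.List.pyRange 0 ((S.length : Int) + 1) 1).find?
        (fun i => !(S.contains i))).getD 0)
      = pvMexLoop S 0 (S.length + 1) :=
    pvIsMex_unique S _ _ (pvFindMex_spec S) (pvMexLoop_spec S)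
  rw [hA, hmex, PySem.Dict.getD_insert_self]

lemma pvStepA_keys (G : PySem.Dict (Int × Int) Int) (a b : Int)
    (h : (a, b) ∉ G.keys) : (pvStepA G a b).keys = G.keys ++ [(a, b)] := by
  have hcf : G.contains (a, b) = false := by
    cases hcb : G.contains (a, b)
    · rfl
    · exact absurd ((PySem.Dict.contains_iff_mem_keys _ _).mp hcb) h
  unfold pvStepA
  exact PySem.Dict.keys_insert_of_not_contains G _ hcf

-- main invariant: along the cell list, B's state is (G, G) for A's running table G
lemma pv_main (m : Int) : ∀ (suf pre : List (Int × Int)) (G : PySem.Dict (Int × Int) Int),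
    pre ++ suf = pvCells m → G.keys = pre →
    suf.foldl (fun st p =>
        let r := pvGrundy ((p.1 + p.2).toNat + 1) st.1 p.1 p.2
        (r.1, st.2.insert (p.1, p.2) r.2)) (G, G)
      = (suf.foldl (fun G p => pvStepA G p.1 p.2) G,
         suf.foldl (fun G p => pvStepA G p.1 p.2) G) := by
  intro suf
  induction suf with
  | nil => intros; rfl
  | cons p rest ih =>
    intro pre G hsplit hkeys
    have hpw : (pre ++ p :: rest).Pairwise pvCellLt := hsplit ▸ pv_pairwise_cells m
    have hnd : (pre ++ p :: rest).Nodup := hsplit ▸ pv_nodup_cells m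
    have hpmem : p ∈ pvCells m := by rw [← hsplit]; simp
    obtain ⟨hp0, hpab, hpbm⟩ := (pv_mem_cells m p).mp hpmem
    have hH : ∀ q : Int × Int, 0 ≤ q.1 → q.1 ≤ q.2 → q.2 ≤ m → q.1 + q.2 < p.1 + p.2 →
        G.contains q = true := by
      intro q hq0 hqab hqbm hqsum
      have hqcells : q ∈ pvCells m := (pv_mem_cells m q).mpr ⟨hq0, hqab, hqbm⟩
      rw [← hsplit] at hqcells
      have hqpre : q ∈ pre := by
        rcases List.mem_append.mp hqcells with h | h
        · exact h
        · exfalso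
          rcases List.mem_cons.mp h with h | h
          · rw [h] at hqsum; omega
          · have := (List.pairwise_append.mp hpw).2.1
            have hlt : pvCellLt p q := (List.pairwise_cons.mp this).1 q h
            rcases hlt with hc | ⟨hc, _⟩ <;> omega
      rw [PySem.Dict.contains_iff_mem_keys, hkeys]
      exact hqpre
    have hfreshk : (p.1, p.2) ∉ G.keys := by
      rw [hkeys]
      intro hc
      have := (List.nodup_append.mp hnd).2.2
      exact this _ hc p (List.mem_cons_self) (by simp)
    have hfresh : G.get? (p.1, p.2) = none := by
      rw [PySem.Dict.get?_eq_none_iff_not_mem_keys]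
      exact hfreshk
    have hstep := pvGrundy_eq_step G m p.1 p.2 hp0 hpab hpbm hH hfresh ((p.1 + p.2).toNat)
    simp only [List.foldl_cons]
    rw [hstep]
    rw [show G.insert (p.1, p.2) ((pvStepA G p.1 p.2).getD (p.1, p.2) 0) = pvStepA G p.1 p.2
      from (pvStepA_insert G p.1 p.2).symm]
    exact ih (pre ++ [p]) _ (by rw [List.append_assoc]; simpa using hsplit)
      (by rw [pvStepA_keys G p.1 p.2 hfreshk, hkeys])

-- ===== VERDICT (by name: the statement is the Claim_ definition above) =====
theorem wythoff_grundy_spec : Claim_equal_wythoff_grundy := by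
  intro m _
  unfold Spec_wythoff_grundy
  rw [pvA_eq_cells, pvB_eq_cells]
  congr 1
  apply congrArg (fun d => PySem.Dict.items d)
  rw [pv_main m (pvCells m) [] PySem.Dict.empty (by simp) PySem.Dict.keys_empty]
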